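-- pv_equiv track=rewrite | github.com/alZyad/aoc-2023 | day2/puzzle2.py | extract_cube_number
-- ===== SOURCE A (Python) =====
-- def extract_cube_number(draw):
--     alphabetic_number = ""
--     for index, character in enumerate(draw):
--         if character.isdigit():
--             alphabetic_number += character
--         else:
--             if len(draw) < index + 2 or alphabetic_number == "":
--                 raise Exception(
--                     'Invalid draw: "{}"'.format(
--                         draw.replace(" ", ".").replace("\n", "⏎")
--                     )
--                 )
--             return [int(alphabetic_number), draw[index:]]
--     raise Exception(
--         'Invalid draw: "{}"'.format(draw.replace(" ", ".").replace("\n", "⏎"))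
--     )
-- ===== SOURCE B (Python) =====
-- def extract_cube_number(draw):
--     # No explicit loop: strip the leading decimal-digit run off with str.lstrip,
--     # recover its length by arithmetic, and slice.
--     rest = draw.lstrip("0123456789")
--     k = len(draw) - len(rest)
--     if k == 0 or len(rest) < 2:
--         raise Exception(
--             'Invalid draw: "{}"'.format(draw.replace(" ", ".").replace("\n", "⏎"))
--         )
--     return [int(draw[:k]), rest]
-- ===== Notes on version B (the rewrite author's own statement) =====
-- stated objective: idiomatic
-- what changed: Replaces the enumerate loop that accumulates digits character by character and early-returns from inside the loop with a loop-free version: str.lstrip removes the leading digit run, its length is recovered by arithmetic, and the two results are obtained by slicing.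
import Mathlib
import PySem

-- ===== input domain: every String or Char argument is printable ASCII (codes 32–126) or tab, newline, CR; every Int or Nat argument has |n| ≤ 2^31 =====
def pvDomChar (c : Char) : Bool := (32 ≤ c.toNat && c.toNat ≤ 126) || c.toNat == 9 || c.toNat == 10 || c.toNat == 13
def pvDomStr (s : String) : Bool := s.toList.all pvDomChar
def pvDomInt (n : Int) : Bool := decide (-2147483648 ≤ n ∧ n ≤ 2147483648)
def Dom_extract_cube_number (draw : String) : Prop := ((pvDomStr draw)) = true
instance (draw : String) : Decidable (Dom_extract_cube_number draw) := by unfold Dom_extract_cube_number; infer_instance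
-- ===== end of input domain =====

-- B parses the same leading-digit-run/remainder split without an explicit loop (lstrip + slicing);
-- equivalence is proved on every input where A returns (Pre_ excludes exactly A's raise paths).

-- ===== PORT A =====
-- the 'for index, character in enumerate(draw)' loop; 'none' = the two raise paths
def extractLoopA (len : Nat) (acc : List Char) (idx : Nat) : List Char → Option (Int × String)
  | [] => none          -- fell off the loop: raise
  | c :: cs =>
    if PySem.Chars.isdigit c then
      extractLoopA len (acc ++ [c]) (idx + 1) cs
    else if len < idx + 2 || acc = [] then none   -- raise
    else some ((PySem.Int.ofChars? acc).getD 0, String.mk (c :: cs))  -- [int(acc), draw[index:]]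

def extract_cube_number (draw : String) : Int × String :=
  (extractLoopA draw.toList.length [] 0 draw.toList).getD (0, "")

-- ===== PORT B =====
def extract_cube_number_alt (draw : String) : Int × String :=
  let cs := draw.toList
  -- draw.lstrip("0123456789"): drop leading characters belonging to the set (exact hand port of lstrip(chars))
  let rest := cs.dropWhile (fun c => ("0123456789".toList).contains c)
  let k := cs.length - rest.length
  if k = 0 ∨ rest.length < 2 then (0, "")   -- B raises here (outside Pre_)
  else ((PySem.Int.ofChars? (cs.take k)).getD 0, String.mk rest)  -- draw[:k] with 0 ≤ k ≤ len is take k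

-- ===== PRECONDITION & SPEC =====
-- Pre_ = exactly the inputs on which Python A returns: a nonempty leading digit run
-- followed by a remainder of length ≥ 2 (which necessarily starts with a non-digit).
def Pre_extract_cube_number (draw : String) : Prop :=
  draw.toList.takeWhile PySem.Chars.isdigit ≠ [] ∧
  2 ≤ (draw.toList.dropWhile PySem.Chars.isdigit).length
instance (draw : String) : Decidable (Pre_extract_cube_number draw) := by
  unfold Pre_extract_cube_number; infer_instance
def pvWitness_extract_cube_number : String := "1 a"
def Spec_extract_cube_number (draw : String) (out : Int × String) : Prop := out = extract_cube_number_alt draw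
instance (draw : String) (out : Int × String) : Decidable (Spec_extract_cube_number draw out) := by unfold Spec_extract_cube_number; infer_instance

-- ===== CLAIM (what is proved, stated in full; the proofs are below) =====
def Claim_equal_extract_cube_number : Prop := ∀ (draw : String), Dom_extract_cube_number draw → Pre_extract_cube_number draw → Spec_extract_cube_number draw (extract_cube_number draw)

-- ===== LEMMAS AND PROOFS =====

lemma char_eq_iff (c d : Char) : (c = d) ↔ c.toNat = d.toNat :=
  ⟨fun h => h ▸ rfl, fun h => Char.ext (UInt32.toNat_inj.mp h)⟩

lemma char_le_iff (c d : Char) : (c ≤ d) ↔ c.toNat ≤ d.toNat := by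
  rw [Char.le_def, UInt32.le_iff_toNat_le]; rfl

lemma digit_mem (c : Char) :
    (("0123456789".toList).contains c) = PySem.Chars.isdigit c := by
  have h : ("0123456789".toList) = ['0','1','2','3','4','5','6','7','8','9'] := by decide
  rw [Bool.eq_iff_iff]
  simp only [h, PySem.Chars.isdigit, List.contains_iff_mem, List.mem_cons, List.not_mem_nil,
    or_false, Bool.and_eq_true, decide_eq_true_eq, char_eq_iff, char_le_iff]
  simp only [show ('0':Char).toNat = 48 from rfl, show ('1':Char).toNat = 49 from rfl,
    show ('2':Char).toNat = 50 from rfl, show ('3':Char).toNat = 51 from rfl,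
    show ('4':Char).toNat = 52 from rfl, show ('5':Char).toNat = 53 from rfl,
    show ('6':Char).toNat = 54 from rfl, show ('7':Char).toNat = 55 from rfl,
    show ('8':Char).toNat = 56 from rfl, show ('9':Char).toNat = 57 from rfl]
  omega

lemma loopA_eq (l : List Char) : ∀ (acc : List Char) (idx len : Nat), len = idx + l.length →
    extractLoopA len acc idx l =
      if (acc ++ l.takeWhile PySem.Chars.isdigit) ≠ [] ∧ 2 ≤ (l.dropWhile PySem.Chars.isdigit).length then
        some ((PySem.Int.ofChars? (acc ++ l.takeWhile PySem.Chars.isdigit)).getD 0,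
              String.mk (l.dropWhile PySem.Chars.isdigit))
      else none := by
  induction l with
  | nil => intro acc idx len h; simp [extractLoopA]
  | cons c cs ih =>
    intro acc idx len h
    by_cases hd : PySem.Chars.isdigit c
    · rw [extractLoopA, if_pos hd, ih (acc ++ [c]) (idx+1) len (by simp [h]; omega)]
      simp [hd]
    · rw [extractLoopA, if_neg hd]
      simp only [List.takeWhile_cons, List.dropWhile_cons, hd, Bool.false_eq_true,
        ite_false, List.append_nil]
      by_cases hra : len < idx + 2 ∨ acc = []
      · rw [if_pos (by simpa using hra), if_neg]
        simp only [List.length_cons] at h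
        rcases hra with h1 | h2
        · intro ⟨_, h2⟩; simp at h2; omega
        · simp [h2]
      · rw [if_neg (by simpa using hra), if_pos]
        simp only [List.length_cons] at h
        simp only [not_or] at hra
        exact ⟨by simp [hra.2], by simp; omega⟩

-- ===== VERDICT (by name: the statement is the Claim_ definition above) =====
lemma take_sub_dropWhile (cs : List Char) (p : Char → Bool) :
    cs.take (cs.length - (cs.dropWhile p).length) = cs.takeWhile p := by
  have hlen : (cs.takeWhile p).length + (cs.dropWhile p).length = cs.length := by
    rw [← List.length_append, List.takeWhile_append_dropWhile]
  have key : (cs.takeWhile p ++ cs.dropWhile p).take (cs.length - (cs.dropWhile p).length)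
      = cs.takeWhile p := List.take_left' (by omega)
  simpa [List.takeWhile_append_dropWhile] using key

theorem extract_cube_number_spec : Claim_equal_extract_cube_number := by
  intro draw _ hpre
  unfold Spec_extract_cube_number extract_cube_number extract_cube_number_alt
  obtain ⟨h1, h2⟩ := hpre
  rw [loopA_eq draw.toList [] 0 draw.toList.length (by simp)]
  simp only [List.nil_append, digit_mem]
  simp only [show (fun c => PySem.Chars.isdigit c) = PySem.Chars.isdigit from rfl]
  rw [if_pos ⟨h1, h2⟩, if_neg]
  · rw [take_sub_dropWhile, Option.getD_some]
  · rintro (hk | hlt)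
    · have hlen : (List.takeWhile PySem.Chars.isdigit draw.toList).length
          + (List.dropWhile PySem.Chars.isdigit draw.toList).length = draw.toList.length := by
        rw [← List.length_append, List.takeWhile_append_dropWhile]
      exact h1 (List.eq_nil_of_length_eq_zero (by omega))
    · omega
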